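-- pv_equiv track=rewrite | github.com/vasnesterov/coq-semsearch | semsearch/extract.py | parse_search_output
-- ===== SOURCE A (Python) =====
-- def parse_search_output(output: str) -> list[tuple[str, str]]:
--     """Parse coqtop Search output into (name, type) pairs.
--
--     Output format:
--     - Normal: `name: type`
--     - Multi-line: `name:` followed by indented continuation lines
--     - Noise: lines starting with Welcome, Coq <, [Loading, etc.
--     """
--     declarations: list[tuple[str, str]] = []
--     current_name: str | None = None
--     current_type_parts: list[str] = []
--
--     for line in output.splitlines():
--         # Skip noise
--         if (
--             not line
--             or line.startswith("Welcome")
--             or line.startswith("Skipping")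
--             or line.startswith("[Loading")
--             or line.startswith("Coq <")
--             or line.startswith("(use ")
--             or line.startswith("Toplevel")
--             or line.startswith("> ")
--             or line.startswith("Error:")
--             or line.startswith("Warning:")
--         ):
--             continue
--
--         # Continuation line (starts with whitespace)
--         if line[0] in (" ", "\t"):
--             if current_name is not None:
--                 current_type_parts.append(line.strip())
--             continue
--
--         # New declaration line: name: type
--         # First, save previous declaration
--         if current_name is not None:
--             type_str = " ".join(current_type_parts)
--             declarations.append((current_name, type_str))
--
--         # Parse new declaration
--         colon_idx = line.find(":")
--         if colon_idx > 0:
--             current_name = line[:colon_idx].strip()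
--             type_rest = line[colon_idx + 1 :].strip()
--             current_type_parts = [type_rest] if type_rest else []
--         else:
--             current_name = None
--             current_type_parts = []
--
--     # Don't forget the last one
--     if current_name is not None:
--         type_str = " ".join(current_type_parts)
--         declarations.append((current_name, type_str))
--
--     return declarations
-- ===== SOURCE B (Python) =====
-- def parse_search_output(output: str) -> list[tuple[str, str]]:
--     """Parse coqtop Search output into (name, type) pairs (block decomposition)."""
--     NOISE = ("Welcome", "Skipping", "[Loading", "Coq <", "(use ",
--              "Toplevel", "> ", "Error:", "Warning:")
--     lines = [l for l in output.splitlines() if l and not l.startswith(NOISE)]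
--     result: list[tuple[str, str]] = []
--     i, n = 0, len(lines)
--     # drop continuation lines that precede any header
--     while i < n and lines[i][0] in " \t":
--         i += 1
--     while i < n:
--         header = lines[i]
--         i += 1
--         conts = []
--         while i < n and lines[i][0] in " \t":
--             conts.append(lines[i].strip())
--             i += 1
--         ci = header.find(":")
--         if ci > 0:
--             rest = header[ci + 1:].strip()
--             parts = ([rest] if rest else []) + conts
--             result.append((header[:ci].strip(), " ".join(parts)))
--     return result
-- ===== Notes on version B (the rewrite author's own statement) =====
-- stated objective: alternative
-- what changed: Replaced A's single stateful pass (current_name/current_type_parts mutated per line) by a two-phase decomposition: filter out noise lines once, then group the remaining lines into header+continuation blocks and emit a pair per block whose header has a positive colon index.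
import Mathlib
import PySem

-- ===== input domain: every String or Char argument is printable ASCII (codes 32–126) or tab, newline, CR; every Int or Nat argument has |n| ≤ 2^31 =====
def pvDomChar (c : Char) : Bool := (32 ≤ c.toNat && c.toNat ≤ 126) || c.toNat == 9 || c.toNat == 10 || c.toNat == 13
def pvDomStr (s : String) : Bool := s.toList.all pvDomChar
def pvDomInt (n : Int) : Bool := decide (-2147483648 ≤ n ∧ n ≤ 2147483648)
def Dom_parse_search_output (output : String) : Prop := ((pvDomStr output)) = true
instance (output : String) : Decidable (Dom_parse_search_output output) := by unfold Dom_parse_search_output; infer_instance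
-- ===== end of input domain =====

-- B re-decomposes A's stateful line loop as filter-noise + chunk-into-blocks + emit; same results, no speed claim.

-- ===== PORT A =====
-- noise test, in A's branch order
def pvNoise (line : String) : Bool :=
  line == "" || PySem.Str.startswith line "Welcome" || PySem.Str.startswith line "Skipping" ||
  PySem.Str.startswith line "[Loading" || PySem.Str.startswith line "Coq <" ||
  PySem.Str.startswith line "(use " || PySem.Str.startswith line "Toplevel" ||
  PySem.Str.startswith line "> " || PySem.Str.startswith line "Error:" ||
  PySem.Str.startswith line "Warning:"

-- line[0] in (" ", "\t"); only reached on non-empty lines (empty lines are noise)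
def pvIsWs (line : String) : Bool :=
  match PySem.Str.pyGet? line 0 with
  | some c => c == ' ' || c == '\t'
  | none => false

def pvStepA (st : List (String × String) × Option String × List String) (line : String) :
    List (String × String) × Option String × List String :=
  let (decls, cn, parts) := st
  if pvNoise line then (decls, cn, parts)
  else if pvIsWs line then
    match cn with
    | some n => (decls, some n, parts ++ [PySem.Str.strip line])
    | none => (decls, cn, parts)
  else
    let decls' := match cn with
      | some n => decls ++ [(n, PySem.Str.join " " parts)]
      | none => decls
    let ci := PySem.Str.find line ":"
    if ci > 0 then
      let name := PySem.Str.strip (PySem.Str.slice line none (some ci))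
      let rest := PySem.Str.strip (PySem.Str.slice line (some (ci + 1)) none)
      (decls', some name, if rest == "" then [] else [rest])
    else (decls', none, [])

def pvFinish (st : List (String × String) × Option String × List String) :
    List (String × String) :=
  match st with
  | (decls, some n, parts) => decls ++ [(n, PySem.Str.join " " parts)]
  | (decls, none, _) => decls

def parse_search_output (output : String) : List (String × String) :=
  pvFinish ((PySem.Str.splitlines output).foldl pvStepA ([], none, []))

-- ===== PORT B =====
-- emit one block (header + stripped continuation lines)
def pvEmit (header : String) (conts : List String) : List (String × String) :=
  let ci := PySem.Str.find header ":"
  if ci > 0 then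
    let rest := PySem.Str.strip (PySem.Str.slice header (some (ci + 1)) none)
    [(PySem.Str.strip (PySem.Str.slice header none (some ci)),
      PySem.Str.join " " ((if rest == "" then [] else [rest]) ++ conts))]
  else []

-- chunk the noise-free lines into blocks: leading ws lines are dropped, each header
-- takes the ws-prefixed lines after it as its continuations
def pvChunks : List String → List (String × String)
  | [] => []
  | l :: ls =>
    if pvIsWs l then pvChunks ls
    else pvEmit l ((ls.takeWhile pvIsWs).map PySem.Str.strip) ++ pvChunks (ls.dropWhile pvIsWs)
termination_by ls => ls.length
decreasing_by
  · simp
  · have := List.length_dropWhile_le pvIsWs ls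
    simp
    omega

def parse_search_output_alt (output : String) : List (String × String) :=
  pvChunks ((PySem.Str.splitlines output).filter (fun l => !pvNoise l))

-- ===== PRECONDITION & SPEC =====
def Spec_parse_search_output (output : String) (out : List (String × String)) : Prop := out = parse_search_output_alt output
instance (output : String) (out : List (String × String)) : Decidable (Spec_parse_search_output output out) := by unfold Spec_parse_search_output; infer_instance

-- ===== CLAIM (what is proved, stated in full; the proofs are below) =====
def Claim_equal_parse_search_output : Prop := ∀ (output : String), Dom_parse_search_output output → Spec_parse_search_output output (parse_search_output output)

-- ===== LEMMAS AND PROOFS =====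

-- A's step is the identity on noise lines, so folding over all lines equals folding over the filtered lines
lemma pvFoldl_filter (ls : List String) (st : List (String × String) × Option String × List String) :
    ls.foldl pvStepA st = (ls.filter (fun l => !pvNoise l)).foldl pvStepA st := by
  induction ls generalizing st with
  | nil => rfl
  | cons l ls ih =>
    by_cases h : pvNoise l = true
    · have hstep : pvStepA st l = st := by
        obtain ⟨d, c, p⟩ := st
        simp [pvStepA, h]
      simp [List.foldl_cons, h, hstep, ih]
    · simp at h
      simp [List.foldl_cons, h, ih]

lemma pvChunks_dropWhile (ls : List String) :
    pvChunks (ls.dropWhile pvIsWs) = pvChunks ls := by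
  induction ls with
  | nil => rfl
  | cons l ls ih =>
    by_cases h : pvIsWs l = true
    · rw [List.dropWhile_cons_of_pos h, ih, pvChunks]
      simp [h]
    · rw [List.dropWhile_cons_of_neg h]

-- main invariant: running A's loop from an arbitrary state over noise-free lines
-- yields the flushed pending declaration followed by B's chunked blocks
lemma pvMain (ls : List String) (hn : ∀ l ∈ ls, pvNoise l = false)
    (decls : List (String × String)) (cn : Option String) (parts : List String) :
    pvFinish (ls.foldl pvStepA (decls, cn, parts)) =
      decls ++
        (match cn with
          | some n => [(n, PySem.Str.join " " (parts ++ (ls.takeWhile pvIsWs).map PySem.Str.strip))]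
          | none => []) ++
        pvChunks (ls.dropWhile pvIsWs) := by
  induction ls generalizing decls cn parts with
  | nil =>
    cases cn <;> simp [pvFinish, pvChunks]
  | cons l ls ih =>
    have hl : pvNoise l = false := hn l (by simp)
    have hn' : ∀ x ∈ ls, pvNoise x = false := fun x hx => hn x (by simp [hx])
    by_cases hw : pvIsWs l = true
    · cases cn with
      | some n =>
        have hstep : pvStepA (decls, some n, parts) l = (decls, some n, parts ++ [PySem.Str.strip l]) := by
          simp [pvStepA, hl, hw]
        rw [List.foldl_cons, hstep, ih hn']
        simp [List.takeWhile_cons_of_pos hw, List.dropWhile_cons_of_pos hw]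
      | none =>
        have hstep : pvStepA (decls, none, parts) l = (decls, none, parts) := by
          simp [pvStepA, hl, hw]
        rw [List.foldl_cons, hstep, ih hn']
        simp [List.dropWhile_cons_of_pos hw]
    · have hdw : (l :: ls).dropWhile pvIsWs = l :: ls := List.dropWhile_cons_of_neg hw
      have hck : pvChunks (l :: ls) =
          pvEmit l ((ls.takeWhile pvIsWs).map PySem.Str.strip) ++ pvChunks (ls.dropWhile pvIsWs) := by
        rw [pvChunks]
        simp [hw]
      set decls' := (match cn with
        | some n => decls ++ [(n, PySem.Str.join " " parts)]
        | none => decls) with hdecls'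
      by_cases hc : PySem.Str.find l ":" > 0
      · have hstep : pvStepA (decls, cn, parts) l =
            (decls', some (PySem.Str.strip (PySem.Str.slice l none (some (PySem.Str.find l ":")))),
              (if PySem.Str.strip (PySem.Str.slice l (some (PySem.Str.find l ":" + 1)) none) == "" then []
               else [PySem.Str.strip (PySem.Str.slice l (some (PySem.Str.find l ":" + 1)) none)])) := by
          simp only [pvStepA, hl, hw, hc]
          simp
          exact hdecls'.symm
        rw [List.foldl_cons, hstep, ih hn', hdw, hck]
        have hemit : pvEmit l ((ls.takeWhile pvIsWs).map PySem.Str.strip) =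
            [(PySem.Str.strip (PySem.Str.slice l none (some (PySem.Str.find l ":"))),
              PySem.Str.join " " ((if PySem.Str.strip (PySem.Str.slice l (some (PySem.Str.find l ":" + 1)) none) == "" then []
                 else [PySem.Str.strip (PySem.Str.slice l (some (PySem.Str.find l ":" + 1)) none)]) ++
                (ls.takeWhile pvIsWs).map PySem.Str.strip))] := by
          simp only [pvEmit, hc, if_pos]
        rw [hemit]
        cases cn <;> simp [hdecls', List.takeWhile_cons_of_neg hw]
      · have hstep : pvStepA (decls, cn, parts) l = (decls', none, []) := by
          simp only [pvStepA, hl, hw, hc]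
          simp
          exact hdecls'.symm
        rw [List.foldl_cons, hstep, ih hn', hdw, hck]
        have hemit : pvEmit l ((ls.takeWhile pvIsWs).map PySem.Str.strip) = [] := by
          simp only [pvEmit, hc]
          simp
        rw [hemit]
        cases cn <;> simp [hdecls', List.takeWhile_cons_of_neg hw]

-- ===== VERDICT (by name: the statement is the Claim_ definition above) =====
theorem parse_search_output_spec : Claim_equal_parse_search_output := by
  intro output _
  unfold Spec_parse_search_output parse_search_output parse_search_output_alt
  rw [pvFoldl_filter]
  set ls := (PySem.Str.splitlines output).filter (fun l => !pvNoise l) with hls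
  have hn : ∀ l ∈ ls, pvNoise l = false := by
    intro l hl
    rw [hls] at hl
    simpa using (List.mem_filter.mp hl).2
  rw [pvMain ls hn [] none []]
  simp [pvChunks_dropWhile]
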